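-- pv_equiv track=rewrite | github.com/carothersresearch/FRENDA-BRENDA | parser.py | reorderParams
-- ===== SOURCE A (Python) =====
-- def reorderParams(parameters, substrates):
--     listParams = []
--
--     for i, item in enumerate(parameters):
--         listParams.append(item[0])
--
--     newSubsList = [None] * len(listParams)
--
--     for substrate in substrates:
--         if substrate in listParams:
--             newSubsList[listParams.index(substrate)] = substrate
--         else:
--             pass
--
--     return newSubsList
-- ===== SOURCE B (Python) =====
-- def reorderParams(parameters, substrates):
--     subs = set(substrates)
--     seen = set()
--     newSubsList = []
--     for item in parameters:
--         k = item[0]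
--         if k in subs and k not in seen:
--             newSubsList.append(k)
--         else:
--             newSubsList.append(None)
--         seen.add(k)
--     return newSubsList
-- ===== Notes on version B (the rewrite author's own statement) =====
-- stated objective: faster
-- what changed: Instead of preallocating a None list and scattering each substrate into a slot found by scanning listParams (in + .index), B builds the output directly in one left-to-right pass over parameters, emitting each slot's key iff it is in a substrate set and is the key's first occurrence (tracked by a seen set).
import Mathlib
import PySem

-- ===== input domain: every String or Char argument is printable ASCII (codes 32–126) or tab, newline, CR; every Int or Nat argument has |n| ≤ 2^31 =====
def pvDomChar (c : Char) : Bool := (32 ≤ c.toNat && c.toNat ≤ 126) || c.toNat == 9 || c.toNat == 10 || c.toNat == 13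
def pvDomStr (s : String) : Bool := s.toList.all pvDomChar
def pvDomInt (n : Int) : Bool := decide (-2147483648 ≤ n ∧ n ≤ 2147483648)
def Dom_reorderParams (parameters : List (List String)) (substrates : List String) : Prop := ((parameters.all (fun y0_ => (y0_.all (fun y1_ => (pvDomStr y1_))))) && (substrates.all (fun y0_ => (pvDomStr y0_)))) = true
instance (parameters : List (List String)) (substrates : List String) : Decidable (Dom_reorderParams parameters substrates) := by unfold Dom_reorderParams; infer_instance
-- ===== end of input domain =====

-- B replaces A's scatter-by-index over a preallocated None list with a single direct
-- left-to-right construction of the output over parameters, using a substrate set and a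
-- seen-keys set (objective: faster).

-- ===== PORT A =====
-- 'item[0]' raises IndexError on an empty item; Pre_ excludes that, the '.getD ""' is only a totalization guard never reached under Pre_.
def reorderParams (parameters : List (List String)) (substrates : List String) : List (Option String) :=
  let listParams := parameters.foldl (fun acc item => acc ++ [(PySem.List.pyGet? item (0 : Int)).getD ""]) []
  let newSubsList : List (Option String) := List.replicate listParams.length none
  substrates.foldl (fun acc substrate =>
    if substrate ∈ listParams then
      match PySem.List.index? listParams substrate with
      | some i => acc.set i (some substrate)
      | none => acc
    else acc) newSubsList

-- ===== PORT B =====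
def reorderParams_alt (parameters : List (List String)) (substrates : List String) : List (Option String) :=
  let subs : PySem.Set String := PySem.Set.ofList substrates
  (parameters.foldl
    (fun (acc : List (Option String) × PySem.Set String) item =>
      let k := (PySem.List.pyGet? item (0 : Int)).getD ""
      (acc.1 ++ [if subs.contains k && !(acc.2.contains k) then some k else none],
       acc.2.add k))
    (([], PySem.Set.empty) : List (Option String) × PySem.Set String)).1

-- ===== PRECONDITION & SPEC =====
-- Pre_: every parameter entry is nonempty — on an empty entry A's 'item[0]' raises IndexError.
def Pre_reorderParams (parameters : List (List String)) (_substrates : List String) : Prop :=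
  ∀ item ∈ parameters, item ≠ []
instance (parameters : List (List String)) (substrates : List String) : Decidable (Pre_reorderParams parameters substrates) := by unfold Pre_reorderParams; infer_instance
def pvWitness_reorderParams : List (List String) × List String := ([["a", "x"], ["b"], ["a"]], ["b", "a", "c"])

def Spec_reorderParams (parameters : List (List String)) (substrates : List String) (out : List (Option String)) : Prop := out = reorderParams_alt parameters substrates
instance (parameters : List (List String)) (substrates : List String) (out : List (Option String)) : Decidable (Spec_reorderParams parameters substrates out) := by unfold Spec_reorderParams; infer_instance

-- ===== CLAIM (what is proved, stated in full; the proofs are below) =====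
def Claim_equal_reorderParams : Prop := ∀ (parameters : List (List String)) (substrates : List String), Dom_reorderParams parameters substrates → Pre_reorderParams parameters substrates → Spec_reorderParams parameters substrates (reorderParams parameters substrates)

-- ===== LEMMAS AND PROOFS =====

-- the key of an item (shared shape of both ports)
def pvKey (item : List String) : String := (PySem.List.pyGet? item (0 : Int)).getD ""

-- A's listParams loop is a map
lemma listParams_eq (parameters : List (List String)) :
    parameters.foldl (fun acc item => acc ++ [(PySem.List.pyGet? item (0 : Int)).getD ""]) []
      = parameters.map pvKey := by
  simpa [pvKey] using PySem.List.foldl_append_singleton_eq_map (l := parameters)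
    (f := fun item => (PySem.List.pyGet? item (0 : Int)).getD "") (acc := [])

-- A's scatter loop preserves the list length
lemma A_foldl_length (ks : List String) (subs : List String) (acc : List (Option String)) :
    (subs.foldl (fun acc substrate =>
        if substrate ∈ ks then
          match PySem.List.index? ks substrate with
          | some j => acc.set j (some substrate)
          | none => acc
        else acc) acc).length = acc.length := by
  induction subs generalizing acc with
  | nil => rfl
  | cons s t ih =>
    simp only [List.foldl_cons]
    rw [ih]
    split
    · split <;> simp
    · rfl

-- A's scatter loop, pointwise: slot i is filled with ks[i] iff ks[i] is a substrate and i is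
-- the first index with that key; otherwise the initial value survives.
lemma A_foldl_get? (ks : List String) (subs : List String) (acc : List (Option String))
    (hlen : acc.length = ks.length) (i : Nat) (hi : i < ks.length) :
    (subs.foldl (fun acc substrate =>
        if substrate ∈ ks then
          match PySem.List.index? ks substrate with
          | some j => acc.set j (some substrate)
          | none => acc
        else acc) acc)[i]?
      = if ks[i] ∈ subs ∧ PySem.List.index? ks ks[i] = some i then some (some ks[i])
        else acc[i]? := by
  induction subs generalizing acc with
  | nil => simp
  | cons s t ih =>
    simp only [List.foldl_cons]
    have hlen' : (if s ∈ ks then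
        match PySem.List.index? ks s with
        | some j => acc.set j (some s)
        | none => acc
      else acc).length = ks.length := by
      split
      · split <;> simp [hlen]
      · exact hlen
    rw [ih _ hlen']
    by_cases hc : ks[i] ∈ t ∧ PySem.List.index? ks ks[i] = some i
    · rw [if_pos hc, if_pos ⟨List.mem_cons_of_mem _ hc.1, hc.2⟩]
    · rw [if_neg hc]
      by_cases hc2 : ks[i] ∈ s :: t ∧ PySem.List.index? ks ks[i] = some i
      · -- then s = ks[i] and it is first at i: the step writes slot i
        rw [if_pos hc2]
        have hs : s = ks[i] := by
          rcases List.mem_cons.1 hc2.1 with h | h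
          · exact h.symm
          · exact absurd ⟨h, hc2.2⟩ hc
        subst hs
        rw [if_pos (List.getElem_mem hi), hc2.2]
        rw [List.getElem?_set_self (by omega)]
      · rw [if_neg hc2]
        -- the step does not touch slot i
        split
        · rename_i hmem
          rcases hidx : PySem.List.index? ks s with _ | j
          · rfl
          · obtain ⟨hj, hkj, _⟩ := PySem.List.getElem_of_index?_eq_some hidx
            have hji : j ≠ i := by
              intro h; subst h
              exact hc2 ⟨by rw [hkj]; exact List.mem_cons_self, by rw [hkj]; exact hidx⟩
            rw [List.getElem?_set_ne hji]
        · rfl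

-- the per-slot values B emits, as a recursive list (proof-only helper)
def bList (subs : PySem.Set String) : List (List String) → PySem.Set String → List (Option String)
  | [], _ => []
  | item :: t, seen =>
    (if subs.contains (pvKey item) && !(seen.contains (pvKey item)) then some (pvKey item) else none)
      :: bList subs t (seen.add (pvKey item))

-- B's fold builds out0 ++ bList
lemma B_foldl_eq (subs : PySem.Set String) (items : List (List String))
    (out0 : List (Option String)) (seen : PySem.Set String) :
    (items.foldl
      (fun (acc : List (Option String) × PySem.Set String) item =>
        let k := (PySem.List.pyGet? item (0 : Int)).getD ""
        (acc.1 ++ [if subs.contains k && !(acc.2.contains k) then some k else none],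
         acc.2.add k))
      (out0, seen)).1 = out0 ++ bList subs items seen := by
  induction items generalizing out0 seen with
  | nil => simp [bList]
  | cons item t ih =>
    simp only [List.foldl_cons]
    rw [ih]
    simp [bList, pvKey]

lemma bList_length (subs : PySem.Set String) (items : List (List String)) (seen : PySem.Set String) :
    (bList subs items seen).length = items.length := by
  induction items generalizing seen with
  | nil => rfl
  | cons item t ih => simp [bList, ih]

-- B pointwise: slot i holds ks[i] iff ks[i] is a substrate, not already seen, and not among earlier keys
lemma bList_get? (subs : PySem.Set String) (items : List (List String)) (seen : PySem.Set String)
    (i : Nat) (hi : i < items.length) :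
    (bList subs items seen)[i]?
      = some (if (items.map pvKey)[i]'(by simpa using hi) ∈ subs ∧
            (items.map pvKey)[i]'(by simpa using hi) ∉ seen ∧
            (items.map pvKey)[i]'(by simpa using hi) ∉ (items.map pvKey).take i
        then some ((items.map pvKey)[i]'(by simpa using hi)) else none) := by
  induction items generalizing seen i with
  | nil => simp at hi
  | cons item t ih =>
    cases i with
    | zero =>
      simp only [bList, List.getElem?_cons_zero, List.getElem_cons_zero, List.map_cons,
        List.take_zero, List.not_mem_nil, not_false_iff, and_true]
      by_cases h1 : pvKey item ∈ subs <;> by_cases h2 : pvKey item ∈ seen <;>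
        simp [h1, h2]
    | succ i =>
      have hi' : i < t.length := by simpa using hi
      simp only [bList, List.getElem?_cons_succ, List.map_cons, List.getElem_cons_succ,
        List.take_succ_cons]
      rw [ih (seen.add (pvKey item)) i hi']
      congr 1
      have hmem : (t.map pvKey)[i]'(by simpa using hi') ∈ PySem.Set.add seen (pvKey item) ↔
          (t.map pvKey)[i]'(by simpa using hi') ∈ seen ∨ (t.map pvKey)[i]'(by simpa using hi') = pvKey item :=
        PySem.Set.mem_add _ _ _
      refine if_congr ?_ rfl rfl
      rw [hmem, List.mem_cons, not_or]
      tauto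

-- first-occurrence bridge: index? hits i exactly when ks[i] is absent from the prefix
lemma index?_eq_iff_not_mem_take (ks : List String) (i : Nat) (hi : i < ks.length) :
    PySem.List.index? ks ks[i] = some i ↔ ks[i] ∉ ks.take i := by
  constructor
  · intro h hmem
    obtain ⟨_, _, hfirst⟩ := PySem.List.getElem_of_index?_eq_some h
    obtain ⟨j, hj, hja⟩ := List.mem_take_iff_getElem.1 hmem
    exact hfirst j (by omega) (by simpa using hja)
  · intro h
    apply (PySem.List.index?_eq_some_iff _ _ _).2
    refine ⟨ks.take i, ks.drop (i + 1), ?_, by simp [List.length_take]; omega, h⟩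
    conv_lhs => rw [← List.take_append_drop i ks]
    rw [List.drop_eq_getElem_cons hi]

-- ===== VERDICT (by name: the statement is the Claim_ definition above) =====
theorem reorderParams_spec : Claim_equal_reorderParams := by
  intro parameters substrates _ _
  unfold Spec_reorderParams reorderParams reorderParams_alt
  simp only [listParams_eq]
  rw [B_foldl_eq, List.nil_append]
  apply List.ext_getElem?
  intro i
  by_cases hi : i < (parameters.map pvKey).length
  · rw [A_foldl_get? (parameters.map pvKey) substrates _ (by simp) i hi,
        bList_get? (PySem.Set.ofList substrates) parameters PySem.Set.empty i (by simpa using hi),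
        List.getElem?_replicate]
    have hbridge := index?_eq_iff_not_mem_take (parameters.map pvKey) i hi
    have hcond : ((parameters.map pvKey)[i] ∈ substrates ∧
          PySem.List.index? (parameters.map pvKey) (parameters.map pvKey)[i] = some i)
        ↔ ((parameters.map pvKey)[i] ∈ PySem.Set.ofList substrates ∧
          (parameters.map pvKey)[i] ∉ (PySem.Set.empty : PySem.Set String) ∧
          (parameters.map pvKey)[i] ∉ (parameters.map pvKey).take i) := by
      rw [hbridge, PySem.Set.mem_ofList]
      simp [PySem.Set.empty]
    rw [if_congr hcond rfl rfl]
    rw [if_pos hi]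
    exact (apply_ite some _ _ _).symm
  · have hlen : ¬ i < parameters.length := by simpa using hi
    rw [List.getElem?_eq_none (by rw [A_foldl_length]; simp; omega),
        List.getElem?_eq_none (by rw [bList_length]; omega)]
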